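-- pv_equiv track=rewrite | github.com/nive927/Python-Algorithms | skyline.py | merge3_outlines
-- ===== SOURCE A (Python) =====
-- def merge3_outlines(u, v):
--     skyline = []
--     i, j, m, n = 0, 0, len(u), len(v)
--
--     while i < m and j < n:
--         if u[i][0] < v[j][0]:
--             uy = u[i][1]
--             vy = v[j][1]
--             x = u[i][0]
--             y = max(uy, vy)
--             if len(skyline) != 0 and skyline[-1][1] == y:
--                 temp = skyline.pop()
--
--             skyline.append((x, y))
--             i += 1
--         else:
--             vy = v[j][1]
--             uy = u[i][1]
--             x = v[j][0]
--             y = max(uy, vy)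
--             if len(skyline) != 0 and skyline[-1][1] == y:
--                 temp = skyline.pop()
--
--             skyline.append((x, y))
--             j += 1
--
--     while i < m:
--         if len(skyline) != 0 and skyline[-1][1] == u[i][1]:
--             temp = skyline.pop()
--         skyline.append(u[i])
--
--         i += 1
--
--     while j < n:
--         if len(skyline) != 0 and skyline[-1][1] == v[j][1]:
--             temp = skyline.pop()
--         skyline.append(v[j])
--
--         j += 1
--
--     return skyline
--
-- u = [(1, 0), (3, 11), (9, 13), (12, 0), (16, 7)]
--
-- v = [(14, 0), (19, 3), (22, 18), (23, 3), (29, 13)]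
-- ===== SOURCE B (Python) =====
-- def merge3_outlines(u, v):
--     # Phase 1: pure two-pointer merge, no popping.
--     merged = []
--     i, j = 0, 0
--     while i < len(u) and j < len(v):
--         if u[i][0] < v[j][0]:
--             merged.append((u[i][0], max(u[i][1], v[j][1])))
--             i += 1
--         else:
--             merged.append((v[j][0], max(u[i][1], v[j][1])))
--             j += 1
--     merged.extend(u[i:])
--     merged.extend(v[j:])
--     # Phase 2: collapse consecutive equal heights (keep the later point).
--     out = []
--     for p in merged:
--         if out and out[-1][1] == p[1]:
--             out.pop()
--         out.append(p)
--     return out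
-- ===== Notes on version B (the rewrite author's own statement) =====
-- stated objective: simpler
-- what changed: Decomposes A's single fused loop into two plain passes: a pure two-pointer merge that builds an intermediate list with no popping, followed by a separate collapse pass that pops the previous point when its height equals the current one.
import Mathlib
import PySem

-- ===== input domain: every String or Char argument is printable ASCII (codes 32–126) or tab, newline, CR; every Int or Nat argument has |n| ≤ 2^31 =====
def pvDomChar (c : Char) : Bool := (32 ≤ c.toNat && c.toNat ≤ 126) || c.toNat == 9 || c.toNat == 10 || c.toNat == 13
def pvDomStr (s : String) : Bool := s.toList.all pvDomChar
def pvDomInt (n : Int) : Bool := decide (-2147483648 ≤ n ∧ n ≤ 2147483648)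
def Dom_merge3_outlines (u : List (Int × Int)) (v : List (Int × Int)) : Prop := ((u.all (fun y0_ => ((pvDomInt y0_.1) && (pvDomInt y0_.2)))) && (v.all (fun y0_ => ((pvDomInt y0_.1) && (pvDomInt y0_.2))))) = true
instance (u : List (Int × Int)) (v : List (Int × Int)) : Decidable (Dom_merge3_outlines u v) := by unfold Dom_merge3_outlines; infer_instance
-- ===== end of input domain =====

-- B replaces A's single fused loop by two plain passes (pure two-pointer merge, then a
-- separate collapse pass); return values proved equal on all inputs (simpler decomposition).

-- ===== PORT A =====
-- A's `if len(skyline) != 0 and skyline[-1][1] == y: skyline.pop()` followed by `skyline.append((x, y))`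
def pvPopAppend (sk : List (Int × Int)) (x y : Int) : List (Int × Int) :=
  if sk ≠ [] ∧ sk.getLast?.map Prod.snd = some y then sk.dropLast ++ [(x, y)]
  else sk ++ [(x, y)]

-- A's three while-loops fused over the skyline accumulator (i/j become list suffixes)
def merge3Go (sk : List (Int × Int)) : List (Int × Int) → List (Int × Int) → List (Int × Int)
  | [], [] => sk
  | [], q :: vs => merge3Go (pvPopAppend sk q.1 q.2) [] vs
  | p :: us, [] => merge3Go (pvPopAppend sk p.1 p.2) us []
  | p :: us, q :: vs =>
      if p.1 < q.1 then merge3Go (pvPopAppend sk p.1 (max p.2 q.2)) us (q :: vs)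
      else merge3Go (pvPopAppend sk q.1 (max p.2 q.2)) (p :: us) vs
  termination_by us vs => us.length + vs.length

def merge3_outlines (u : List (Int × Int)) (v : List (Int × Int)) : List (Int × Int) :=
  merge3Go [] u v

-- ===== PORT B =====
-- Phase 1 of Source B: pure two-pointer merge with no popping (tails appended as-is)
def mergePhase : List (Int × Int) → List (Int × Int) → List (Int × Int)
  | [], vs => vs
  | us, [] => us
  | p :: us, q :: vs =>
      if p.1 < q.1 then (p.1, max p.2 q.2) :: mergePhase us (q :: vs)
      else (q.1, max p.2 q.2) :: mergePhase (p :: us) vs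
  termination_by us vs => us.length + vs.length

-- Phase 2 of Source B: `if out and out[-1][1] == p[1]: out.pop()` then `out.append(p)`
def collapseStep (out : List (Int × Int)) (p : Int × Int) : List (Int × Int) :=
  if out ≠ [] ∧ out.getLast?.map Prod.snd = some p.2 then out.dropLast ++ [p]
  else out ++ [p]

def merge3_outlines_alt (u : List (Int × Int)) (v : List (Int × Int)) : List (Int × Int) :=
  (mergePhase u v).foldl collapseStep []

-- ===== PRECONDITION & SPEC =====
def Spec_merge3_outlines (u : List (Int × Int)) (v : List (Int × Int)) (out : List (Int × Int)) : Prop := out = merge3_outlines_alt u v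
instance (u : List (Int × Int)) (v : List (Int × Int)) (out : List (Int × Int)) : Decidable (Spec_merge3_outlines u v out) := by unfold Spec_merge3_outlines; infer_instance

-- ===== CLAIM (what is proved, stated in full; the proofs are below) =====
def Claim_equal_merge3_outlines : Prop := ∀ (u : List (Int × Int)) (v : List (Int × Int)), Dom_merge3_outlines u v → Spec_merge3_outlines u v (merge3_outlines u v)

-- ===== LEMMAS AND PROOFS =====

theorem popAppend_eq_collapseStep (sk : List (Int × Int)) (p : Int × Int) :
    pvPopAppend sk p.1 p.2 = collapseStep sk p := by
  cases p; rfl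

-- A's fused loop is the collapse fold over B's merged list, for any accumulator.
theorem merge3Go_eq_foldl (sk us vs : List (Int × Int)) :
    merge3Go sk us vs = (mergePhase us vs).foldl collapseStep sk := by
  induction sk, us, vs using merge3Go.induct with
  | case1 sk => simp [merge3Go, mergePhase]
  | case2 sk q vs ih =>
      simp only [merge3Go, popAppend_eq_collapseStep] at ih ⊢
      rw [ih]
      simp [mergePhase]
  | case3 sk p us ih =>
      simp only [merge3Go, popAppend_eq_collapseStep] at ih ⊢
      rw [ih]
      cases us <;> simp [mergePhase]
  | case4 sk p us q vs hlt ih =>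
      simp only [merge3Go, if_pos hlt] at ih ⊢
      rw [ih, mergePhase, if_pos hlt, List.foldl_cons]; rfl
  | case5 sk p us q vs hlt ih =>
      simp only [merge3Go, if_neg hlt] at ih ⊢
      rw [ih, mergePhase, if_neg hlt, List.foldl_cons]; rfl

-- ===== VERDICT (by name: the statement is the Claim_ definition above) =====
theorem merge3_outlines_spec : Claim_equal_merge3_outlines := by
  intro u v _
  unfold Spec_merge3_outlines merge3_outlines merge3_outlines_alt
  exact merge3Go_eq_foldl [] u v
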